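-- pv_equiv track=rewrite | github.com/cheonjiwan/Algorithm | 프로그래머스/Level2/조이스틱.py | solution
-- ===== SOURCE A (Python) =====
-- def solution(name):
--     ans=0
--     ans1=0;ans2=0;cnt=0
--     str_to_int=[min( ord(c)-ord('A'), 26-(ord(c)-ord('A')) ) for c in name]
--
--     idx=0
--     while True:
--         ans+=str_to_int[idx]
--         str_to_int[idx]=0
--         if sum(str_to_int)==0: return ans
--
--         left,right=1,1
--         while str_to_int[idx-left]==0: left+=1
--         while str_to_int[idx+right]==0: right+=1
--         ans+=left if left<right else right
--         idx+= -left if left<right else right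
-- ===== SOURCE B (Python) =====
-- def solution(name):
--     n = len(name)
--     cost = [min(ord(c) - ord('A'), 26 - (ord(c) - ord('A'))) for c in name]
--     ans = cost[0]
--     total = sum(cost) - cost[0]
--     ptrs = [p for p in range(1, n) if cost[p] != 0]
--     i, j = 0, len(ptrs) - 1
--     r = 0
--     while total != 0:
--         dl = r + n - ptrs[j]
--         dr = ptrs[i] - r
--         if dl < dr:
--             p = ptrs[j]; j -= 1; r = p - n; ans += dl
--         else:
--             p = ptrs[i]; i += 1; r = p; ans += dr
--         ans += cost[p]
--         total -= cost[p]
--     return ans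
-- ===== Notes on version B (the rewrite author's own statement) =====
-- stated objective: faster
-- what changed: B precomputes the letter costs once and replaces A's per-iteration full-array sum and linear left/right nearest-nonzero scans by a running total plus a two-pointer sweep over the sorted list of nonzero positions (each step pops one end in O(1)), turning the O(n^2) greedy into O(n).
-- outside the precondition, e.g. on solution(''): A raises IndexError, B raises IndexError
import Mathlib
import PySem

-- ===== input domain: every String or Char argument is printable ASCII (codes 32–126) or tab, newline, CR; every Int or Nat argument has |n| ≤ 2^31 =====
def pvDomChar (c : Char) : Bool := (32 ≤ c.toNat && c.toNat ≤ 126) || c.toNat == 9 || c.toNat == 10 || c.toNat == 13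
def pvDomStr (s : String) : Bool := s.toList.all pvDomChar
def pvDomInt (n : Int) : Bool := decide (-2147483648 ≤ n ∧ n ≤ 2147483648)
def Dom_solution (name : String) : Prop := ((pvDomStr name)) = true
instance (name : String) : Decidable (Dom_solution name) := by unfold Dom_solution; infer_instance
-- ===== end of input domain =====

-- B replaces A's quadratic rescanning greedy (full-array sum + linear nearest-nonzero scans
-- every iteration) by a two-pointer sweep over the sorted list of nonzero positions with a
-- running total: objective 'faster' (O(n^2) → O(n)).

-- ===== PORT A =====
-- min(ord(c)-ord('A'), 26-(ord(c)-ord('A')))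
def costOf (c : Char) : Int := min ((c.toNat : Int) - 65) (26 - ((c.toNat : Int) - 65))

-- `left=1; while str_to_int[idx-left]==0: left+=1` (fuel-bounded; none = IndexError / fuel out)
def scanL (v : List Int) (idx : Int) : Int → Nat → Option Int
  | _, 0 => none
  | l, f+1 =>
    match PySem.List.pyGet? v (idx - l) with
    | none => none
    | some x => if x = 0 then scanL v idx (l + 1) f else some l

-- `right=1; while str_to_int[idx+right]==0: right+=1`
def scanR (v : List Int) (idx : Int) : Int → Nat → Option Int
  | _, 0 => none
  | l, f+1 =>
    match PySem.List.pyGet? v (idx + l) with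
    | none => none
    | some x => if x = 0 then scanR v idx (l + 1) f else some l

-- the `while True` loop of A; the `0` results (IndexError / fuel exhaustion) are unreachable
-- on nonempty input (proved below)
def loopA : Nat → Int → List Int → Int → Int
  | 0, _, _, _ => 0
  | f+1, ans, v, idx =>
    match PySem.List.pyGet? v idx with
    | none => 0
    | some x =>
      let ans2 := ans + x
      let v2 := PySem.List.pySetD v idx 0
      if v2.sum = 0 then ans2
      else
        match scanL v2 idx 1 (2 * v2.length + 2), scanR v2 idx 1 (2 * v2.length + 2) with
        | some l, some r =>
          if l < r then loopA f (ans2 + l) v2 (idx - l) else loopA f (ans2 + r) v2 (idx + r)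
        | _, _ => 0

def solution (name : String) : Int :=
  let sti := name.toList.map costOf
  loopA (sti.length + 1) 0 sti 0

-- ===== PORT B =====
-- `while total != 0: ...` two-pointer loop of Source B (fuel-bounded; `0` unreachable on Pre_)
def loopB (cost ptrs : List Int) (n : Int) : Nat → Int → Int → Int → Int → Int → Int
  | 0, _, _, _, _, _ => 0
  | f+1, total, ans, r, i, j =>
    if total = 0 then ans
    else
      match PySem.List.pyGet? ptrs j, PySem.List.pyGet? ptrs i with
      | some pj, some pi =>
        let dl := r + n - pj
        let dr := pi - r
        if dl < dr then
          let c := PySem.List.pyGetD cost pj 0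
          loopB cost ptrs n f (total - c) (ans + dl + c) (pj - n) i (j - 1)
        else
          let c := PySem.List.pyGetD cost pi 0
          loopB cost ptrs n f (total - c) (ans + dr + c) pi (i + 1) j
      | _, _ => 0

def solution_alt (name : String) : Int :=
  let cost := name.toList.map costOf
  let n : Int := (cost.length : Int)
  match PySem.List.pyGet? cost 0 with
  | none => 0
  | some c0 =>
    let total := cost.sum - c0
    let ptrs := (PySem.List.pyRange 1 n).filter (fun p => PySem.List.pyGetD cost p 0 != 0)
    loopB cost ptrs n (ptrs.length + 1) total c0 0 0 ((ptrs.length : Int) - 1)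

-- ===== PRECONDITION & SPEC =====
-- Pre_ excludes only the empty string, on which the Python A raises IndexError.
def Pre_solution (name : String) : Prop := name.toList ≠ []
instance (name : String) : Decidable (Pre_solution name) := by unfold Pre_solution; infer_instance
def pvWitness_solution : String := "JEROEN"

def Spec_solution (name : String) (out : Int) : Prop := out = solution_alt name
instance (name : String) (out : Int) : Decidable (Spec_solution name out) := by unfold Spec_solution; infer_instance

-- ===== CLAIM (what is proved, stated in full; the proofs are below) =====
def Claim_equal_solution : Prop := ∀ (name : String), Dom_solution name → Pre_solution name → Spec_solution name (solution name)

-- ===== LEMMAS AND PROOFS =====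

-- the contents of A's working array `str_to_int` when exactly the positions of `ptrs`
-- lying in the interval [a,b] still carry their cost and everything else has been zeroed
def mask (cost ptrs : List Int) (a b : Int) : List Int :=
  (List.range cost.length).map
    (fun (p : Nat) => if ((p : Int) ∈ ptrs ∧ a ≤ (p : Int) ∧ (p : Int) ≤ b) then cost.getD p 0 else 0)

-- Python residue of a raw index q ∈ [-len, len)
def res (n q : Int) : Int := if 0 ≤ q then q else q + n

lemma length_mask (cost ptrs : List Int) (a b : Int) :
    (mask cost ptrs a b).length = cost.length := by simp [mask]

lemma getElem_mask (cost ptrs : List Int) (a b : Int) (p : Nat) (hp : p < cost.length) :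
    (mask cost ptrs a b)[p]'(by simpa [length_mask] using hp)
      = if ((p : Int) ∈ ptrs ∧ a ≤ (p : Int) ∧ (p : Int) ≤ b) then cost.getD p 0 else 0 := by
  simp [mask]

lemma pyGet?_window (xs : List Int) (q : Int)
    (h1 : -(xs.length : Int) ≤ q) (h2 : q < xs.length) :
    PySem.List.pyGet? xs q = xs[(res (xs.length : Int) q).toNat]? := by
  by_cases hq : 0 ≤ q
  · rw [PySem.List.pyGet?_of_nonneg _ hq]; simp [res, hq]
  · have hk : q = -(((-q).toNat : Int)) := by omega
    rw [show PySem.List.pyGet? xs q = PySem.List.pyGet? xs (-(((-q).toNat : Int))) from by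
      rw [← hk], PySem.List.pyGet?_neg_natCast _ _ (by omega) (by omega)]
    have hidx : xs.length - (-q).toNat = (res (xs.length : Int) q).toNat := by
      simp only [res, if_neg hq]; omega
    rw [hidx]

lemma pyGet?_mask (cost ptrs : List Int) (a b q : Int)
    (h1 : -(cost.length : Int) ≤ q) (h2 : q < cost.length) :
    PySem.List.pyGet? (mask cost ptrs a b) q
      = some (if (res (cost.length : Int) q ∈ ptrs ∧ a ≤ res (cost.length : Int) q ∧
                    res (cost.length : Int) q ≤ b)
              then cost.getD (res (cost.length : Int) q).toNat 0 else 0) := by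
  have hlen : (mask cost ptrs a b).length = cost.length := length_mask ..
  rw [pyGet?_window _ _ (by omega) (by omega)]
  rw [hlen]
  have hres : (res (cost.length : Int) q).toNat < cost.length := by
    simp only [res]; split_ifs <;> omega
  have hcast : ((res (cost.length : Int) q).toNat : Int) = res (cost.length : Int) q := by
    simp only [res]; split_ifs <;> omega
  rw [List.getElem?_eq_getElem (by omega), getElem_mask cost ptrs a b _ hres, hcast]

lemma pySetD_window (xs : List Int) (q : Int) (v : Int)
    (h1 : -(xs.length : Int) ≤ q) (h2 : q < xs.length) :
    PySem.List.pySetD xs q v = xs.set (res (xs.length : Int) q).toNat v := by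
  by_cases hq : 0 ≤ q
  · rw [PySem.List.pySetD_of_nonneg _ _ hq]; simp [res, hq]
  · simp only [PySem.List.pySetD, PySem.List.pySet?, PySem.List.pyIdx?, if_neg hq,
      if_pos (show -(xs.length : Int) ≤ q by omega)]
    have hidx : xs.length - (-q).toNat = (res (xs.length : Int) q).toNat := by
      simp only [res, if_neg hq]; omega
    simp [hidx]

lemma sum_set_zero (xs : List Int) (k : Nat) (hk : k < xs.length) :
    (xs.set k 0).sum = xs.sum - xs[k] := by
  have h2 : xs.sum = (xs.take k).sum + (xs.drop k).sum := by
    rw [← List.sum_append, List.take_append_drop]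
  have h3 : xs.drop k = xs[k] :: xs.drop (k+1) := List.drop_eq_getElem_cons hk
  rw [List.sum_set, if_pos hk, h2, h3, List.sum_cons]
  ring

lemma scanL_spec (v : List Int) (idx L c : Int) :
    ∀ (f : Nat) (l : Int), l ≤ L → (L - l).toNat < f →
    (∀ t : Int, l ≤ t → t < L → PySem.List.pyGet? v (idx - t) = some 0) →
    PySem.List.pyGet? v (idx - L) = some c → c ≠ 0 →
    scanL v idx l f = some L := by
  intro f
  induction f with
  | zero => intro l h1 h2; omega
  | succ f ih =>
    intro l h1 h2 hzero hL hc
    rcases eq_or_lt_of_le h1 with h | h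
    · subst h
      simp only [scanL, hL]
      simp [hc]
    · have hz := hzero l le_rfl h
      simp only [scanL, hz]
      exact ih (l+1) (by omega) (by omega) (fun t ht1 ht2 => hzero t (by omega) ht2) hL hc

lemma scanR_spec (v : List Int) (idx L c : Int) :
    ∀ (f : Nat) (l : Int), l ≤ L → (L - l).toNat < f →
    (∀ t : Int, l ≤ t → t < L → PySem.List.pyGet? v (idx + t) = some 0) →
    PySem.List.pyGet? v (idx + L) = some c → c ≠ 0 →
    scanR v idx l f = some L := by
  intro f
  induction f with
  | zero => intro l h1 h2; omega
  | succ f ih =>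
    intro l h1 h2 hzero hL hc
    rcases eq_or_lt_of_le h1 with h | h
    · subst h
      simp only [scanR, hL]
      simp [hc]
    · have hz := hzero l le_rfl h
      simp only [scanR, hz]
      exact ih (l+1) (by omega) (by omega) (fun t ht1 ht2 => hzero t (by omega) ht2) hL hc


lemma length_pyRange_one (a b : Int) : (PySem.List.pyRange a b).length = (b - a).toNat := by
  simp only [PySem.List.pyRange]
  norm_num
  omega

lemma mem_ptrs (cost ptrs : List Int)
    (hP : ptrs = (PySem.List.pyRange 1 (cost.length : Int)).filter
      (fun p => PySem.List.pyGetD cost p 0 != 0))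
    (p : Int) (hp : p ∈ ptrs) :
    1 ≤ p ∧ p < (cost.length : Int) ∧ cost.getD p.toNat 0 ≠ 0 := by
  subst hP
  rcases List.mem_filter.mp hp with ⟨hmem, hpred⟩
  have hb := PySem.List.mem_pyRange_one.mp hmem
  refine ⟨hb.1, hb.2, ?_⟩
  rw [show p = ((p.toNat : Nat) : Int) by omega, PySem.List.pyGetD_natCast] at hpred
  simpa using hpred

lemma sorted_ptrs (cost ptrs : List Int)
    (hP : ptrs = (PySem.List.pyRange 1 (cost.length : Int)).filter
      (fun p => PySem.List.pyGetD cost p 0 != 0)) :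
    List.Pairwise (· < ·) ptrs := by
  subst hP
  apply List.Pairwise.filter
  simp only [PySem.List.pyRange]
  norm_num
  refine List.pairwise_map.mpr (List.pairwise_lt_range.imp ?_)
  intro a b h; omega

-- members of ptrs outside of the pyRange-filter are zero-cost positions
lemma not_mem_ptrs (cost ptrs : List Int)
    (hP : ptrs = (PySem.List.pyRange 1 (cost.length : Int)).filter
      (fun p => PySem.List.pyGetD cost p 0 != 0))
    (p : Nat) (hp1 : 1 ≤ p) (hp2 : p < cost.length) (hp : (p : Int) ∉ ptrs) :
    cost.getD p 0 = 0 := by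
  subst hP
  by_contra hc
  apply hp
  refine List.mem_filter.mpr ⟨PySem.List.mem_pyRange_one.mpr (by omega), ?_⟩
  rw [PySem.List.pyGetD_natCast]
  simpa using hc

lemma set_mask_eq (cost ptrs : List Int) (a b a' b' : Int) (s : Nat)
    (hs : s < cost.length)
    (hmem : ∀ p : Int, p ∈ ptrs → ((a ≤ p ∧ p ≤ b ∧ p ≠ (s : Int)) ↔ (a' ≤ p ∧ p ≤ b'))) :
    (mask cost ptrs a b).set s 0 = mask cost ptrs a' b' := by
  apply List.ext_getElem (by simp [length_mask])
  intro p h1 h2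
  rw [List.getElem_set]
  have hp : p < cost.length := by simpa [length_mask] using h2
  rw [getElem_mask cost ptrs a' b' p hp]
  by_cases hps : s = p
  · subst hps
    rw [if_pos rfl, if_neg]
    rintro ⟨hin, h4, h5⟩
    exact ((hmem _ hin).mpr ⟨h4, h5⟩).2.2 rfl
  · rw [if_neg hps, getElem_mask cost ptrs a b p hp]
    have hpsi : (p : Int) ≠ (s : Int) := by
      intro hc; exact hps (by omega)
    by_cases hin : (p : Int) ∈ ptrs
    · have hiff := hmem _ hin
      by_cases hab : a ≤ (p:Int) ∧ (p:Int) ≤ b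
      · have h' := hiff.mp ⟨hab.1, hab.2, hpsi⟩
        rw [if_pos ⟨hin, hab.1, hab.2⟩, if_pos ⟨hin, h'.1, h'.2⟩]
      · rw [if_neg (by rintro ⟨_, h4, h5⟩; exact hab ⟨h4, h5⟩), if_neg]
        rintro ⟨_, h4, h5⟩
        have h' := hiff.mpr ⟨h4, h5⟩
        exact hab ⟨h'.1, h'.2.1⟩
    · rw [if_neg (by rintro ⟨h3, _⟩; exact hin h3), if_neg (by rintro ⟨h3, _⟩; exact hin h3)]

lemma sum_mask_empty (cost ptrs : List Int) (a b : Int) (h : b < a) :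
    (mask cost ptrs a b).sum = 0 := by
  apply List.sum_eq_zero
  intro x hx
  simp only [mask, List.mem_map] at hx
  rcases hx with ⟨p, _, hpx⟩
  rw [if_neg (by rintro ⟨_, h1, h2⟩; omega)] at hpx
  exact hpx.symm


-- both scans of A on a masked array: left stops at b (wrapped), right stops at a
lemma scans_mask (cost ptrs : List Int)
    (hP : ptrs = (PySem.List.pyRange 1 (cost.length : Int)).filter
      (fun p => PySem.List.pyGetD cost p 0 != 0))
    (a b r : Int) (hab : a ≤ b) (ha : a ∈ ptrs) (hb : b ∈ ptrs)
    (hr1 : -(cost.length : Int) < r) (hr2 : r < cost.length)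
    (hra : 0 ≤ r → r < a) (hrb : r < 0 → b < r + cost.length) :
    scanL (mask cost ptrs a b) r 1 (2 * (mask cost ptrs a b).length + 2)
        = some (r + cost.length - b)
    ∧ scanR (mask cost ptrs a b) r 1 (2 * (mask cost ptrs a b).length + 2)
        = some (a - r) := by
  obtain ⟨ha1, ha2, ha3⟩ := mem_ptrs cost ptrs hP a ha
  obtain ⟨hb1, hb2, hb3⟩ := mem_ptrs cost ptrs hP b hb
  have hn : (0 : Int) < cost.length := by omega
  have hL : (1 : Int) ≤ r + cost.length - b := by
    by_cases h : 0 ≤ r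
    · have := hra h; omega
    · have := hrb (by omega); omega
  have hL' : (1 : Int) ≤ a - r := by
    by_cases h : 0 ≤ r
    · have := hra h; omega
    · omega
  have hlen : (mask cost ptrs a b).length = cost.length := length_mask ..
  have hresb : res (cost.length : Int) (r - (r + ↑cost.length - b)) = b := by
    simp only [res]; split_ifs with hq <;> omega
  have hresa : res (cost.length : Int) (r + (a - r)) = a := by
    simp only [res]; split_ifs with hq <;> omega
  constructor
  · refine scanL_spec _ r (r + (cost.length : Int) - b) (cost.getD b.toNat 0)
      (2 * (mask cost ptrs a b).length + 2) 1 hL (by rw [hlen]; omega) ?_ ?_ hb3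
    · intro t ht1 ht2
      have hq1 : -(cost.length : Int) ≤ r - t := by omega
      have hq2 : r - t < cost.length := by omega
      rw [pyGet?_mask cost ptrs a b _ hq1 hq2, if_neg]
      rintro ⟨hin, h4, h5⟩
      simp only [res] at h4 h5
      by_cases h : 0 ≤ r
      · have := hra h
        split_ifs at h4 h5 with hq <;> omega
      · have := hrb (by omega)
        split_ifs at h4 h5 with hq <;> omega
    · have h1 : -(cost.length : Int) ≤ r - (r + ↑cost.length - b) := by omega
      have h2 : r - (r + ↑cost.length - b) < cost.length := by omega
      rw [pyGet?_mask cost ptrs a b _ h1 h2, hresb, if_pos ⟨hb, hab, le_refl b⟩]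
  · refine scanR_spec _ r (a - r) (cost.getD a.toNat 0)
      (2 * (mask cost ptrs a b).length + 2) 1 hL' (by rw [hlen]; omega) ?_ ?_ ha3
    · intro t ht1 ht2
      have hq1 : -(cost.length : Int) ≤ r + t := by omega
      have hq2 : r + t < cost.length := by omega
      rw [pyGet?_mask cost ptrs a b _ hq1 hq2, if_neg]
      rintro ⟨hin, h4, h5⟩
      simp only [res] at h4 h5
      by_cases h : 0 ≤ r
      · have := hra h
        split_ifs at h4 h5 with hq <;> omega
      · have := hrb (by omega)
        split_ifs at h4 h5 with hq <;> omega
    · have h1 : -(cost.length : Int) ≤ r + (a - r) := by omega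
      have h2 : r + (a - r) < cost.length := by omega
      rw [pyGet?_mask cost ptrs a b _ h1 h2, hresa, if_pos ⟨ha, le_refl a, hab⟩]


lemma getD_mono (ptrs : List Int) (hs : List.Pairwise (· < ·) ptrs)
    (i j : Nat) (hij : i < j) (hj : j < ptrs.length) :
    ptrs.getD i 0 < ptrs.getD j 0 := by
  rw [List.getD_eq_getElem _ _ (by omega), List.getD_eq_getElem _ _ hj]
  exact List.pairwise_iff_getElem.mp hs i j (by omega) hj hij

lemma getD_mem (ptrs : List Int) (i : Nat) (hi : i < ptrs.length) :
    ptrs.getD i 0 ∈ ptrs := by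
  rw [List.getD_eq_getElem _ _ hi]; exact List.getElem_mem _

-- dropping the smallest remaining position from the interval
lemma step_iff_right (ptrs : List Int) (hs : List.Pairwise (· < ·) ptrs)
    (i j : Nat) (hij : i + 1 ≤ j) (hj : j < ptrs.length) (p : Int) (hp : p ∈ ptrs) :
    (ptrs.getD i 0 ≤ p ∧ p ≤ ptrs.getD j 0 ∧ p ≠ ptrs.getD i 0
      ↔ ptrs.getD (i+1) 0 ≤ p ∧ p ≤ ptrs.getD j 0) := by
  obtain ⟨t, ht, rfl⟩ := List.mem_iff_getElem.mp hp
  have hmono := List.pairwise_iff_getElem.mp hs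
  have hii : ptrs.getD i 0 = ptrs[i]'(by omega) := List.getD_eq_getElem _ _ (by omega)
  have hi1 : ptrs.getD (i+1) 0 = ptrs[i+1]'(by omega) := List.getD_eq_getElem _ _ (by omega)
  have hjj : ptrs.getD j 0 = ptrs[j]'(by omega) := List.getD_eq_getElem _ _ hj
  constructor
  · rintro ⟨h1, h2, h3⟩
    refine ⟨?_, h2⟩
    rcases Nat.lt_or_ge t (i+1) with h | h
    · rcases Nat.lt_or_ge t i with h' | h'
      · exact absurd (hmono t i (by omega) (by omega) h') (by rw [hii] at h1; omega)
      · have : t = i := by omega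
        subst this; rw [hii] at h3; exact absurd rfl h3
    · rcases Nat.eq_or_lt_of_le h with h' | h'
      · subst h'; rw [hi1]
      · rw [hi1]; exact le_of_lt (hmono (i+1) t (by omega) (by omega) h')
  · rintro ⟨h1, h2⟩
    have hlt : ptrs.getD i 0 < ptrs.getD (i+1) 0 := getD_mono ptrs hs i (i+1) (by omega) (by omega)
    exact ⟨by omega, h2, by omega⟩

-- dropping the largest remaining position from the interval
lemma step_iff_left (ptrs : List Int) (hs : List.Pairwise (· < ·) ptrs)
    (i j : Nat) (hij : i + 1 ≤ j) (hj : j < ptrs.length) (p : Int) (hp : p ∈ ptrs) :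
    (ptrs.getD i 0 ≤ p ∧ p ≤ ptrs.getD j 0 ∧ p ≠ ptrs.getD j 0
      ↔ ptrs.getD i 0 ≤ p ∧ p ≤ ptrs.getD (j-1) 0) := by
  obtain ⟨t, ht, rfl⟩ := List.mem_iff_getElem.mp hp
  have hmono := List.pairwise_iff_getElem.mp hs
  have hjj : ptrs.getD j 0 = ptrs[j]'(by omega) := List.getD_eq_getElem _ _ hj
  have hj1 : ptrs.getD (j-1) 0 = ptrs[j-1]'(by omega) := List.getD_eq_getElem _ _ (by omega)
  constructor
  · rintro ⟨h1, h2, h3⟩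
    refine ⟨h1, ?_⟩
    rcases Nat.lt_or_ge t j with h | h
    · rcases Nat.eq_or_lt_of_le (show t ≤ j - 1 by omega) with h' | h'
      · subst h'; rw [hj1]
      · rw [hj1]; exact le_of_lt (hmono t (j-1) (by omega) (by omega) h')
    · rcases Nat.eq_or_lt_of_le h with h' | h'
      · subst h'; rw [hjj] at h3; exact absurd rfl h3
      · exact absurd (hmono j t (by omega) (by omega) h') (by rw [hjj] at h2; omega)
  · rintro ⟨h1, h2⟩
    have hlt : ptrs.getD (j-1) 0 < ptrs.getD j 0 := getD_mono ptrs hs (j-1) j (by omega) hj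
    exact ⟨h1, by omega, by omega⟩

-- the endpoints bound every member
lemma ends_bound (ptrs : List Int) (hs : List.Pairwise (· < ·) ptrs)
    (hne : ptrs ≠ []) (p : Int) (hp : p ∈ ptrs) :
    ptrs.getD 0 0 ≤ p ∧ p ≤ ptrs.getD (ptrs.length - 1) 0 := by
  obtain ⟨t, ht, rfl⟩ := List.mem_iff_getElem.mp hp
  have hmono := List.pairwise_iff_getElem.mp hs
  have hlen : 0 < ptrs.length := List.length_pos_iff.mpr hne
  have h0 : ptrs.getD 0 0 = ptrs[0]'(by omega) := List.getD_eq_getElem _ _ (by omega)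
  have hl : ptrs.getD (ptrs.length - 1) 0 = ptrs[ptrs.length - 1]'(by omega) :=
    List.getD_eq_getElem _ _ (by omega)
  constructor
  · rcases Nat.eq_or_lt_of_le (Nat.zero_le t) with h | h
    · subst h; rw [h0]
    · rw [h0]; exact le_of_lt (hmono 0 t (by omega) (by omega) h)
  · rcases Nat.eq_or_lt_of_le (show t ≤ ptrs.length - 1 by omega) with h | h
    · subst h; rw [hl]
    · rw [hl]; exact le_of_lt (hmono t (ptrs.length - 1) (by omega) (by omega) h)

-- the array after A's first zeroing is the full mask
lemma initial_mask (cost ptrs : List Int)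
    (hP : ptrs = (PySem.List.pyRange 1 (cost.length : Int)).filter
      (fun p => PySem.List.pyGetD cost p 0 != 0))
    (hne : ptrs ≠ []) (h0 : 0 < cost.length) :
    cost.set 0 0 = mask cost ptrs (ptrs.getD 0 0) (ptrs.getD (ptrs.length - 1) 0) := by
  have hs := sorted_ptrs cost ptrs hP
  apply List.ext_getElem (by simp [length_mask])
  intro p h1 h2
  have hp : p < cost.length := by simpa using h1
  rw [List.getElem_set, getElem_mask cost ptrs _ _ p hp]
  by_cases hp0 : 0 = p
  · subst hp0
    rw [if_pos rfl, if_neg]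
    rintro ⟨hin, _⟩
    have := mem_ptrs cost ptrs hP 0 hin
    omega
  · rw [if_neg hp0]
    by_cases hin : (p : Int) ∈ ptrs
    · have hbd := ends_bound ptrs hs hne _ hin
      rw [if_pos ⟨hin, hbd.1, hbd.2⟩, List.getD_eq_getElem _ _ hp]
    · rw [if_neg (by rintro ⟨h3, _⟩; exact hin h3)]
      rw [show cost[p] = cost.getD p 0 from (List.getD_eq_getElem _ _ hp).symm]
      exact not_mem_ptrs cost ptrs hP p (by omega) hp hin


lemma mask_getElem_mem (cost ptrs : List Int) (a b p : Int) (h0 : 0 ≤ p)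
    (hp : p.toNat < cost.length) (hin : p ∈ ptrs) (h1 : a ≤ p) (h2 : p ≤ b) :
    (mask cost ptrs a b)[p.toNat]'(by rw [length_mask]; exact hp) = cost.getD p.toNat 0 := by
  rw [getElem_mask cost ptrs a b p.toNat hp, if_pos]
  have hc : ((p.toNat : Nat) : Int) = p := Int.toNat_of_nonneg h0
  rw [hc]
  exact ⟨hin, h1, h2⟩

-- the main loop invariant: A's loop on a masked array equals B's two-pointer loop,
-- where A sits at raw index r (= smallest remaining position, or largest minus n)
lemma core (cost ptrs : List Int)
    (hP : ptrs = (PySem.List.pyRange 1 (cost.length : Int)).filter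
      (fun p => PySem.List.pyGetD cost p 0 != 0)) :
    ∀ (k i j fa fb : Nat) (ans r : Int),
    i ≤ j → j < ptrs.length → j - i = k → k + 1 ≤ fa → k + 1 ≤ fb →
    (r = ptrs.getD i 0 ∨ r = ptrs.getD j 0 - cost.length) →
    loopA fa ans (mask cost ptrs (ptrs.getD i 0) (ptrs.getD j 0)) r
      = if 0 ≤ r then
          loopB cost ptrs (cost.length : Int) fb
            ((mask cost ptrs (ptrs.getD i 0) (ptrs.getD j 0)).sum - cost.getD r.toNat 0)
            (ans + cost.getD r.toNat 0) r ((i : Int) + 1) (j : Int)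
        else
          loopB cost ptrs (cost.length : Int) fb
            ((mask cost ptrs (ptrs.getD i 0) (ptrs.getD j 0)).sum
              - cost.getD (r + cost.length).toNat 0)
            (ans + cost.getD (r + cost.length).toNat 0) r (i : Int) ((j : Int) - 1) := by
  intro k
  induction k using Nat.strong_induction_on with
  | _ k IH =>
  intro i j fa fb ans r hij hj hk hfa hfb hr
  obtain ⟨fa, rfl⟩ : ∃ x, fa = x + 1 := ⟨fa - 1, by omega⟩
  obtain ⟨fb, rfl⟩ : ∃ x, fb = x + 1 := ⟨fb - 1, by omega⟩
  have hs := sorted_ptrs cost ptrs hP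
  set a := ptrs.getD i 0 with ha_def
  set b := ptrs.getD j 0 with hb_def
  have hamem : a ∈ ptrs := getD_mem ptrs i (by omega)
  have hbmem : b ∈ ptrs := getD_mem ptrs j hj
  obtain ⟨ha1, ha2, ha3⟩ := mem_ptrs cost ptrs hP a hamem
  obtain ⟨hb1, hb2, hb3⟩ := mem_ptrs cost ptrs hP b hbmem
  have hab : a ≤ b := by
    rcases Nat.eq_or_lt_of_le hij with h | h
    · rw [ha_def, hb_def, h]
    · exact le_of_lt (getD_mono ptrs hs i j h hj)
  have hlen := length_mask cost ptrs a b
  rcases hr with hr | hr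
  · -- arrived from the right move: r = a = smallest remaining position
    have h0r : 0 ≤ r := by omega
    rw [if_pos h0r]
    have hres : res (cost.length : Int) r = r := by simp [res, h0r]
    have hget : PySem.List.pyGet? (mask cost ptrs a b) r = some (cost.getD r.toNat 0) := by
      rw [pyGet?_mask cost ptrs a b r (by omega) (by omega), hres,
        if_pos ⟨by rwa [hr], by omega, by omega⟩]
    have hset : PySem.List.pySetD (mask cost ptrs a b) r 0
        = (mask cost ptrs a b).set r.toNat 0 := by
      rw [pySetD_window _ _ _ (by rw [hlen]; omega) (by rw [hlen]; omega)]
      congr 1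
      simp [res, h0r]
    have hsum : ((mask cost ptrs a b).set r.toNat 0).sum
        = (mask cost ptrs a b).sum - cost.getD r.toNat 0 := by
      rw [sum_set_zero _ _ (by rw [hlen]; omega)]
      congr 1
      exact mask_getElem_mem cost ptrs a b r h0r (by omega) (by rwa [hr]) (by omega) (by omega)
    simp only [loopA, loopB, hget, hset, hsum]
    by_cases htz : (mask cost ptrs a b).sum - cost.getD r.toNat 0 = 0
    · rw [if_pos htz, if_pos htz]
    · rw [if_neg htz, if_neg htz]
      have hij' : i < j := by
        rcases Nat.eq_or_lt_of_le hij with h | h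
        · exfalso
          apply htz
          rw [← hsum, set_mask_eq cost ptrs a b (b+1) b r.toNat (by omega)
            (fun p hp => by
              have hrc : ((r.toNat : Nat) : Int) = r := Int.toNat_of_nonneg h0r
              rw [hrc]
              constructor
              · rintro ⟨h1', h2', h3'⟩
                have hab' : a = b := by rw [ha_def, hb_def, h]
                omega
              · rintro ⟨h1', h2'⟩; omega)]
          exact sum_mask_empty cost ptrs (b+1) b (by omega)
        · exact h
      set a2 := ptrs.getD (i+1) 0 with ha2_def
      have ha2mem : a2 ∈ ptrs := getD_mem ptrs (i+1) (by omega)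
      obtain ⟨ha21, ha22, ha23⟩ := mem_ptrs cost ptrs hP a2 ha2mem
      have haa2 : a < a2 := getD_mono ptrs hs i (i+1) (by omega) (by omega)
      have ha2b : a2 ≤ b := by
        rcases Nat.eq_or_lt_of_le (show i + 1 ≤ j by omega) with h | h
        · rw [ha2_def, hb_def, h]
        · exact le_of_lt (getD_mono ptrs hs (i+1) j h hj)
      have hv2 : (mask cost ptrs a b).set r.toNat 0 = mask cost ptrs a2 b := by
        apply set_mask_eq cost ptrs a b a2 b r.toNat (by omega)
        intro p hp
        have hrc : ((r.toNat : Nat) : Int) = r := Int.toNat_of_nonneg h0r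
        rw [hrc, hr]
        exact step_iff_right ptrs hs i j (by omega) hj p hp
      have hmasksum : (mask cost ptrs a2 b).sum
          = (mask cost ptrs a b).sum - cost.getD r.toNat 0 := by rw [← hv2, hsum]
      have hscan := scans_mask cost ptrs hP a2 b r ha2b ha2mem hbmem (by omega) (by omega)
        (fun _ => by omega) (fun hc => absurd hc (by omega))
      rw [hv2, hscan.1, hscan.2]
      -- B side lookups
      have hgj : PySem.List.pyGet? ptrs (j : Int) = some b := by
        rw [PySem.List.pyGet?_natCast, List.getElem?_eq_getElem hj, hb_def,
          List.getD_eq_getElem _ _ hj]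
      have hgi : PySem.List.pyGet? ptrs ((i : Int) + 1) = some a2 := by
        rw [show ((i : Int) + 1) = (((i+1 : Nat)) : Int) by push_cast; ring,
          PySem.List.pyGet?_natCast, List.getElem?_eq_getElem (show i+1 < ptrs.length by omega),
          ha2_def, List.getD_eq_getElem _ _ (show i+1 < ptrs.length by omega)]
      rw [hgj, hgi]
      simp only []
      split_ifs with hcmp
      · -- move left to b - n
        have hrec := IH (j - (i+1)) (by omega) (i+1) j fa fb
          (ans + cost.getD r.toNat 0 + (r + (cost.length : Int) - b))
          (b - (cost.length : Int)) (by omega) hj rfl (by omega) (by omega)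
          (Or.inr (by rw [hb_def]))
        rw [show r - (r + (cost.length : Int) - b) = b - (cost.length : Int) by ring, hrec,
          if_neg (by omega)]
        have hbtn : (b - (cost.length : Int) + (cost.length : Int)).toNat = b.toNat := by omega
        have hcb : PySem.List.pyGetD cost b 0 = cost.getD b.toNat 0 := by
          rw [PySem.List.pyGetD_eq_getElem cost 0 (by omega) (by omega),
            List.getD_eq_getElem _ _ (by omega)]
        rw [hbtn, hmasksum, hcb]
        congr 1 <;> omega
      · -- move right to a2
        have hrec := IH (j - (i+1)) (by omega) (i+1) j fa fb
          (ans + cost.getD r.toNat 0 + (a2 - r)) a2 (by omega) hj rfl (by omega) (by omega)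
          (Or.inl (by rw [ha2_def]))
        rw [show r + (a2 - r) = a2 by ring, hrec, if_pos (by omega)]
        have hca : PySem.List.pyGetD cost a2 0 = cost.getD a2.toNat 0 := by
          rw [PySem.List.pyGetD_eq_getElem cost 0 (by omega) (by omega),
            List.getD_eq_getElem _ _ (by omega)]
        rw [hmasksum, hca]
        congr 1 <;> omega
  · -- arrived from the left move: r = b - n
    have h0r : r < 0 := by omega
    rw [if_neg (by omega)]
    have hres : res (cost.length : Int) r = b := by simp [res]; omega
    have hget : PySem.List.pyGet? (mask cost ptrs a b) r
        = some (cost.getD (r + cost.length).toNat 0) := by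
      rw [pyGet?_mask cost ptrs a b r (by omega) (by omega), hres,
        if_pos ⟨hbmem, hab, le_refl b⟩]
      congr 2
      omega
    have hset : PySem.List.pySetD (mask cost ptrs a b) r 0
        = (mask cost ptrs a b).set (r + cost.length).toNat 0 := by
      rw [pySetD_window _ _ _ (by rw [hlen]; omega) (by rw [hlen]; omega)]
      congr 1
      simp only [res, hlen]
      split_ifs with h <;> omega
    have hsum : ((mask cost ptrs a b).set (r + cost.length).toNat 0).sum
        = (mask cost ptrs a b).sum - cost.getD (r + cost.length).toNat 0 := by
      rw [sum_set_zero _ _ (by rw [hlen]; omega)]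
      congr 1
      have hbn : (r + (cost.length : Int)).toNat = b.toNat := by omega
      simp only [hbn]
      exact mask_getElem_mem cost ptrs a b b (by omega) (by omega) hbmem hab (le_refl b)
    simp only [loopA, loopB, hget, hset, hsum]
    by_cases htz : (mask cost ptrs a b).sum - cost.getD (r + cost.length).toNat 0 = 0
    · rw [if_pos htz, if_pos htz]
    · rw [if_neg htz, if_neg htz]
      have hij' : i < j := by
        rcases Nat.eq_or_lt_of_le hij with h | h
        · exfalso
          apply htz
          rw [← hsum, set_mask_eq cost ptrs a b (b+1) b (r + cost.length).toNat (by omega)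
            (fun p hp => by
              have hrc : (((r + cost.length).toNat : Nat) : Int) = b := by omega
              rw [hrc]
              constructor
              · rintro ⟨h1', h2', h3'⟩
                have hab' : a = b := by rw [ha_def, hb_def, h]
                omega
              · rintro ⟨h1', h2'⟩; omega)]
          exact sum_mask_empty cost ptrs (b+1) b (by omega)
        · exact h
      set b2 := ptrs.getD (j-1) 0 with hb2_def
      have hb2mem : b2 ∈ ptrs := getD_mem ptrs (j-1) (by omega)
      obtain ⟨hb21, hb22, hb23⟩ := mem_ptrs cost ptrs hP b2 hb2mem
      have hbb2 : b2 < b := getD_mono ptrs hs (j-1) j (by omega) hj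
      have hab2 : a ≤ b2 := by
        rcases Nat.eq_or_lt_of_le (show i ≤ j - 1 by omega) with h | h
        · rw [ha_def, hb2_def, h]
        · exact le_of_lt (getD_mono ptrs hs i (j-1) h (by omega))
      have hv2 : (mask cost ptrs a b).set (r + cost.length).toNat 0 = mask cost ptrs a b2 := by
        apply set_mask_eq cost ptrs a b a b2 (r + cost.length).toNat (by omega)
        intro p hp
        have hrc : (((r + cost.length).toNat : Nat) : Int) = b := by omega
        rw [hrc]
        exact step_iff_left ptrs hs i j (by omega) hj p hp
      have hmasksum : (mask cost ptrs a b2).sum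
          = (mask cost ptrs a b).sum - cost.getD (r + cost.length).toNat 0 := by
        rw [← hv2, hsum]
      have hscan := scans_mask cost ptrs hP a b2 r hab2 hamem hb2mem (by omega) (by omega)
        (fun hc => absurd hc (by omega)) (fun _ => by omega)
      rw [hv2, hscan.1, hscan.2]
      have hgj : PySem.List.pyGet? ptrs ((j : Int) - 1) = some b2 := by
        rw [show ((j : Int) - 1) = (((j-1 : Nat)) : Int) by push_cast; omega,
          PySem.List.pyGet?_natCast, List.getElem?_eq_getElem (show j-1 < ptrs.length by omega),
          hb2_def, List.getD_eq_getElem _ _ (show j-1 < ptrs.length by omega)]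
      have hgi : PySem.List.pyGet? ptrs (i : Int) = some a := by
        rw [PySem.List.pyGet?_natCast, List.getElem?_eq_getElem (show i < ptrs.length by omega),
          ha_def, List.getD_eq_getElem _ _ (show i < ptrs.length by omega)]
      rw [hgj, hgi]
      simp only []
      split_ifs with hcmp
      · -- move left to b2 - n
        have hrec := IH ((j-1) - i) (by omega) i (j-1) fa fb
          (ans + cost.getD (r + cost.length).toNat 0 + (r + (cost.length : Int) - b2))
          (b2 - (cost.length : Int)) (by omega) (by omega) rfl (by omega) (by omega)
          (Or.inr (by rw [hb2_def]))
        rw [show r - (r + (cost.length : Int) - b2) = b2 - (cost.length : Int) by ring, hrec,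
          if_neg (by omega)]
        have hbtn : (b2 - (cost.length : Int) + (cost.length : Int)).toNat = b2.toNat := by omega
        have hcb : PySem.List.pyGetD cost b2 0 = cost.getD b2.toNat 0 := by
          rw [PySem.List.pyGetD_eq_getElem cost 0 (by omega) (by omega),
            List.getD_eq_getElem _ _ (by omega)]
        rw [hbtn, hmasksum, hcb]
        congr 1 <;> omega
      · -- move right to a
        have hrec := IH ((j-1) - i) (by omega) i (j-1) fa fb
          (ans + cost.getD (r + cost.length).toNat 0 + (a - r)) a (by omega) (by omega) rfl
          (by omega) (by omega) (Or.inl (by rw [ha_def]))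
        rw [show r + (a - r) = a by ring, hrec, if_pos (by omega)]
        have hca : PySem.List.pyGetD cost a 0 = cost.getD a.toNat 0 := by
          rw [PySem.List.pyGetD_eq_getElem cost 0 (by omega) (by omega),
            List.getD_eq_getElem _ _ (by omega)]
        rw [hmasksum, hca]
        congr 1 <;> omega

lemma ptrs_nonempty (cost ptrs : List Int)
    (hP : ptrs = (PySem.List.pyRange 1 (cost.length : Int)).filter
      (fun p => PySem.List.pyGetD cost p 0 != 0))
    (h0 : 0 < cost.length) (htz : (cost.set 0 0).sum ≠ 0) : ptrs ≠ [] := by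
  intro hnil
  apply htz
  apply List.sum_eq_zero
  intro x hx
  obtain ⟨t, ht, hxt⟩ := List.mem_iff_getElem.mp hx
  have ht' : t < cost.length := by simpa using ht
  rw [List.getElem_set] at hxt
  by_cases ht0 : 0 = t
  · rw [if_pos ht0] at hxt; exact hxt.symm
  · rw [if_neg ht0] at hxt
    have : cost.getD t 0 = 0 := by
      apply not_mem_ptrs cost ptrs hP t (by omega) ht'
      rw [hnil]
      exact List.not_mem_nil
    rw [← hxt, ← List.getD_eq_getElem _ _ ht', this]

-- ===== VERDICT (by name: the statement is the Claim_ definition above) =====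
set_option maxHeartbeats 2000000 in
theorem solution_spec : Claim_equal_solution := by
  unfold Claim_equal_solution Spec_solution Pre_solution
  intro name _ hne
  unfold solution solution_alt
  simp only []
  set cost := name.toList.map costOf with hcost
  have hlen0 : 0 < cost.length := by
    rw [hcost, List.length_map]
    exact List.length_pos_iff.mpr hne
  set ptrs := (PySem.List.pyRange 1 (cost.length : Int)).filter
    (fun p => PySem.List.pyGetD cost p 0 != 0) with hptrs
  have hP : ptrs = (PySem.List.pyRange 1 (cost.length : Int)).filter
    (fun p => PySem.List.pyGetD cost p 0 != 0) := hptrs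
  have hs := sorted_ptrs cost ptrs hP
  have hmlen : ptrs.length ≤ cost.length - 1 := by
    have h1 : ptrs.length ≤ (PySem.List.pyRange 1 (cost.length : Int)).length :=
      hptrs ▸ List.length_filter_le _ _
    rw [length_pyRange_one] at h1
    omega
  have hget0 : PySem.List.pyGet? cost 0 = some (cost.getD 0 0) := by
    rw [PySem.List.pyGet?_zero, List.getElem?_eq_getElem hlen0, List.getD_eq_getElem _ _ hlen0]
  have hset0 : PySem.List.pySetD cost 0 0 = cost.set 0 0 := by
    rw [PySem.List.pySetD_of_nonneg _ _ le_rfl]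
    norm_num
  have hsum0 : (cost.set 0 0).sum = cost.sum - cost.getD 0 0 := by
    rw [sum_set_zero _ _ hlen0, List.getD_eq_getElem _ _ hlen0]
  simp only [loopA, loopB, hget0, hset0, hsum0]
  by_cases htz : cost.sum - cost.getD 0 0 = 0
  · rw [if_pos htz, if_pos htz]
    omega
  · rw [if_neg htz, if_neg htz]
    have hne' : ptrs ≠ [] := ptrs_nonempty cost ptrs hP hlen0 (by rw [hsum0]; exact htz)
    have hm1 : 1 ≤ ptrs.length := List.length_pos_iff.mpr hne'
    set p0 := ptrs.getD 0 0 with hp0_def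
    set pl := ptrs.getD (ptrs.length - 1) 0 with hpl_def
    have hp0mem : p0 ∈ ptrs := getD_mem ptrs 0 (by omega)
    have hplmem : pl ∈ ptrs := getD_mem ptrs (ptrs.length - 1) (by omega)
    obtain ⟨hq1, hq2, hq3⟩ := mem_ptrs cost ptrs hP p0 hp0mem
    obtain ⟨hl1, hl2, hl3⟩ := mem_ptrs cost ptrs hP pl hplmem
    have hp0pl : p0 ≤ pl := by
      rcases Nat.eq_or_lt_of_le (show (0:Nat) ≤ ptrs.length - 1 by omega) with h | h
      · rw [hp0_def, hpl_def, ← h]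
      · exact le_of_lt (getD_mono ptrs hs 0 (ptrs.length - 1) h (by omega))
    have hmask0 : cost.set 0 0 = mask cost ptrs p0 pl := initial_mask cost ptrs hP hne' hlen0
    have hscan := scans_mask cost ptrs hP p0 pl 0 hp0pl hp0mem hplmem (by omega) (by omega)
      (fun _ => by omega) (fun hc => absurd hc (by omega))
    rw [hmask0, hscan.1, hscan.2]
    have hgl : PySem.List.pyGet? ptrs ((ptrs.length : Int) - 1) = some pl := by
      rw [show ((ptrs.length : Int) - 1) = (((ptrs.length - 1 : Nat)) : Int) by omega,
        PySem.List.pyGet?_natCast,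
        List.getElem?_eq_getElem (show ptrs.length - 1 < ptrs.length by omega),
        hpl_def, List.getD_eq_getElem _ _ (show ptrs.length - 1 < ptrs.length by omega)]
    have hg0 : PySem.List.pyGet? ptrs (0 : Int) = some p0 := by
      rw [show (0 : Int) = ((0 : Nat) : Int) by norm_num, PySem.List.pyGet?_natCast,
        List.getElem?_eq_getElem (show 0 < ptrs.length by omega), hp0_def,
        List.getD_eq_getElem _ _ (show 0 < ptrs.length by omega)]
    rw [hgl, hg0]
    simp only []
    have hmsum : (mask cost ptrs p0 pl).sum = cost.sum - cost.getD 0 0 := by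
      rw [← hmask0, hsum0]
    split_ifs with hcmp
    · -- move left
      have hrec := core cost ptrs hP (ptrs.length - 1) 0 (ptrs.length - 1) cost.length
        (ptrs.length) (0 + cost.getD 0 0 + (0 + (cost.length : Int) - pl))
        (pl - (cost.length : Int)) (by omega) (by omega) rfl (by omega) (by omega)
        (Or.inr (by rw [hpl_def]))
      rw [show (0 : Int) - (0 + (cost.length : Int) - pl) = pl - (cost.length : Int) by ring,
        hrec, if_neg (by omega)]
      have hbtn : (pl - (cost.length : Int) + (cost.length : Int)).toNat = pl.toNat := by omega
      have hcb : PySem.List.pyGetD cost pl 0 = cost.getD pl.toNat 0 := by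
        rw [PySem.List.pyGetD_eq_getElem cost 0 (by omega) (by omega),
          List.getD_eq_getElem _ _ (by omega)]
      rw [hbtn, hmsum, hcb]
      congr 1 <;> omega
    · -- move right
      have hrec := core cost ptrs hP (ptrs.length - 1) 0 (ptrs.length - 1) cost.length
        (ptrs.length) (0 + cost.getD 0 0 + (p0 - 0)) p0 (by omega) (by omega) rfl (by omega)
        (by omega) (Or.inl (by rw [hp0_def]))
      rw [show (0 : Int) + (p0 - 0) = p0 by ring, hrec, if_pos (by omega)]
      have hca : PySem.List.pyGetD cost p0 0 = cost.getD p0.toNat 0 := by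
        rw [PySem.List.pyGetD_eq_getElem cost 0 (by omega) (by omega),
          List.getD_eq_getElem _ _ (by omega)]
      rw [hmsum, hca]
      congr 1 <;> omega
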